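-- pv_equiv track=rewrite | github.com/manojkumar621/norman_incidents_data_engineering | assignment2.py | augment_location_ranks
-- ===== SOURCE A (Python) =====
-- from collections import Counter
--
-- def augment_location_ranks(all_incidents):
--     # Extract locations from the tuples in the incidents_list
--     locations = [incident[4] for incident in all_incidents]
--     # Count the frequency of each location
--     location_counts = Counter(locations)
--
--     # Assign ranks to locations based on their frequency
--     sorted_locations = sorted(location_counts.items(), key=lambda x: (-x[1], x[0]))
--
--     # Assign ranks cumulatively
--     cumulative_rank = 1
--     location_ranks = {}
--     for location, count in sorted_locations:
--         location_ranks[location] = cumulative_rank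
--         cumulative_rank += count
--
--     # Update the tuples in the incidents_list with the corresponding location ranks
--     updated_incidents_list = [(incident[0], incident[1], incident[2], incident[3], incident[4], incident[5], incident[6], incident[7], incident[8], location_ranks.get(incident[4], 1000)) for incident in all_incidents]
--     return updated_incidents_list
-- ===== SOURCE B (Python) =====
-- from collections import Counter
--
-- def augment_location_ranks(all_incidents):
--     # Rank by definition instead of sort+cumulate: rank(L) = 1 + total count of
--     # locations strictly ahead of L in the (-count, name) ordering.
--     counts = Counter(inc[4] for inc in all_incidents)
--     ranks = {}
--     for loc, c in counts.items():
--         r = 1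
--         for loc2, c2 in counts.items():
--             if c2 > c or (c2 == c and loc2 < loc):
--                 r += c2
--         ranks[loc] = r
--     return [(i[0], i[1], i[2], i[3], i[4], i[5], i[6], i[7], i[8], ranks[i[4]])
--             for i in all_incidents]
-- ===== Notes on version B (the rewrite author's own statement) =====
-- stated objective: alternative
-- what changed: B drops the sort and the running cumulative rank entirely: each location's rank is computed directly from the ordering definition as 1 + the total count of locations strictly ahead of it under (-count, name).
import Mathlib
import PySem

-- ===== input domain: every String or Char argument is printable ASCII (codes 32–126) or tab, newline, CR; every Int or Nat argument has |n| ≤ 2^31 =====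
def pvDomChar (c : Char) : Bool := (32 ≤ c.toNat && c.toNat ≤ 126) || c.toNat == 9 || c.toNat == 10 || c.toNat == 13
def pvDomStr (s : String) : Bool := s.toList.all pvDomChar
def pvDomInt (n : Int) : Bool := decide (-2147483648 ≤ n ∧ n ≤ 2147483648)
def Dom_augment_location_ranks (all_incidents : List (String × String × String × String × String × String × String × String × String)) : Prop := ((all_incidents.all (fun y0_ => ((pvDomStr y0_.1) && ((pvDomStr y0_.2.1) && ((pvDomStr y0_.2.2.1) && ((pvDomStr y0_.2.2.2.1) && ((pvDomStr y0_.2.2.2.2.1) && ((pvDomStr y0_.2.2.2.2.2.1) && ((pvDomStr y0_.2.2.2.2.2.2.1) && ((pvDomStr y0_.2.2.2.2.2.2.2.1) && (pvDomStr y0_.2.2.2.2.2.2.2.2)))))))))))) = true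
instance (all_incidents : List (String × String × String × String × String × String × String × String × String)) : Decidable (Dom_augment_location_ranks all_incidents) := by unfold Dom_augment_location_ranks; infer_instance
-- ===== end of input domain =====

-- ===== PORT A =====
-- B replaces A's sort + cumulative-rank loop by a direct per-location rank formula; alternative decomposition, same results.
def augment_location_ranks (all_incidents : List (String × String × String × String × String × String × String × String × String)) : List (String × String × String × String × String × String × String × String × String × Int) :=
  let locations := all_incidents.map (fun incident => incident.2.2.2.2.1)
  let location_counts : PySem.Dict String Int := PySem.Dict.counter locations
  let sorted_locations := PySem.List.sorted2 location_counts.items (fun x => -x.2) (fun x => x.1)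
  -- cumulative_rank = 1; location_ranks = {}; for location, count in sorted_locations: ...
  let st := sorted_locations.foldl
    (fun (st : PySem.Dict String Int × Int) p => (st.1.insert p.1 st.2, st.2 + p.2))
    (PySem.Dict.empty, 1)
  let location_ranks := st.1
  all_incidents.map (fun i =>
    (i.1, i.2.1, i.2.2.1, i.2.2.2.1, i.2.2.2.2.1, i.2.2.2.2.2.1, i.2.2.2.2.2.2.1,
     i.2.2.2.2.2.2.2.1, i.2.2.2.2.2.2.2.2, location_ranks.getD i.2.2.2.2.1 1000))

-- ===== PORT B =====
-- r = 1; for loc2, c2 in counts.items(): if c2 > c or (c2 == c and loc2 < loc): r += c2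
def altRank (items : List (String × Int)) (loc : String) (c : Int) : Int :=
  items.foldl (fun r p => if p.2 > c ∨ (p.2 = c ∧ p.1 < loc) then r + p.2 else r) 1

def augment_location_ranks_alt (all_incidents : List (String × String × String × String × String × String × String × String × String)) : List (String × String × String × String × String × String × String × String × String × Int) :=
  let counts : PySem.Dict String Int := PySem.Dict.counter (all_incidents.map (fun inc => inc.2.2.2.2.1))
  let ranks := counts.items.foldl
    (fun (d : PySem.Dict String Int) p => d.insert p.1 (altRank counts.items p.1 p.2))
    PySem.Dict.empty
  -- ranks[i[4]]: the key is always present (i[4] was counted), so the KeyError case (none) is unreachable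
  all_incidents.map (fun i =>
    (i.1, i.2.1, i.2.2.1, i.2.2.2.1, i.2.2.2.2.1, i.2.2.2.2.2.1, i.2.2.2.2.2.2.1,
     i.2.2.2.2.2.2.2.1, i.2.2.2.2.2.2.2.2, (ranks.get? i.2.2.2.2.1).getD 0))

-- ===== PRECONDITION & SPEC =====
-- explicit DecidableEq for the 10-tuple (instance search exceeds its default depth on it)
def pvDecEqT : DecidableEq (String × String × String × String × String × String × String × String × String × Int) :=
  fun a b =>
    decidable_of_iff (a.1 = b.1 ∧ a.2.1 = b.2.1 ∧ a.2.2.1 = b.2.2.1 ∧ a.2.2.2.1 = b.2.2.2.1 ∧ a.2.2.2.2.1 = b.2.2.2.2.1 ∧ a.2.2.2.2.2.1 = b.2.2.2.2.2.1 ∧ a.2.2.2.2.2.2.1 = b.2.2.2.2.2.2.1 ∧ a.2.2.2.2.2.2.2.1 = b.2.2.2.2.2.2.2.1 ∧ a.2.2.2.2.2.2.2.2.1 = b.2.2.2.2.2.2.2.2.1 ∧ a.2.2.2.2.2.2.2.2.2 = b.2.2.2.2.2.2.2.2.2)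
      (by obtain ⟨a1,a2,a3,a4,a5,a6,a7,a8,a9,a10⟩ := a; obtain ⟨b1,b2,b3,b4,b5,b6,b7,b8,b9,b10⟩ := b; simp [Prod.ext_iff])

def Spec_augment_location_ranks (all_incidents : List (String × String × String × String × String × String × String × String × String)) (out : List (String × String × String × String × String × String × String × String × String × Int)) : Prop := out = augment_location_ranks_alt all_incidents
instance (all_incidents : List (String × String × String × String × String × String × String × String × String)) (out : List (String × String × String × String × String × String × String × String × String × Int)) : Decidable (Spec_augment_location_ranks all_incidents out) := by unfold Spec_augment_location_ranks; exact @instDecidableEqList _ pvDecEqT _ _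

-- ===== CLAIM (what is proved, stated in full; the proofs are below) =====
def Claim_equal_augment_location_ranks : Prop := ∀ (all_incidents : List (String × String × String × String × String × String × String × String × String)), Dom_augment_location_ranks all_incidents → Spec_augment_location_ranks all_incidents (augment_location_ranks all_incidents)

-- ===== LEMMAS AND PROOFS =====

-- A's sort key (-count, name) is the lexicographic order on Int ×ₗ String
lemma sorted2_eq_sorted_lex (xs : List (String × Int)) :
    PySem.List.sorted2 xs (fun x => -x.2) (fun x => x.1) =
    PySem.List.sorted xs (fun x => toLex (-x.2, x.1)) false := by
  rw [PySem.List.sorted_eq_foldl_insertBy]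
  show xs.foldl (fun acc x => PySem.List.insertBy
      (fun a b => decide ((-a.2 : Int) < -b.2) || (!decide ((-b.2 : Int) < -a.2) && decide (a.1 < b.1))) x acc) [] = _
  have h : (fun (a b : String × Int) => decide ((-a.2 : Int) < -b.2) || (!decide ((-b.2 : Int) < -a.2) && decide (a.1 < b.1)))
      = (fun (a b : String × Int) => decide (toLex ((-a.2 : Int), a.1) < toLex ((-b.2 : Int), b.1))) := by
    funext a b
    rcases lt_trichotomy (-a.2 : Int) (-b.2) with h | h | h
    · simp [Prod.Lex.toLex_lt_toLex, h, lt_asymm h]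
    · simp [Prod.Lex.toLex_lt_toLex, h]
    · simp [Prod.Lex.toLex_lt_toLex, h, lt_asymm h, ne_of_gt h]
  rw [h]

-- B's test is exactly "strictly ahead in the (-count, name) order"
lemma pred_iff_key_lt (p : String × Int) (L : String) (c : Int) :
    (p.2 > c ∨ (p.2 = c ∧ p.1 < L)) ↔ toLex ((-p.2 : Int), p.1) < toLex ((-c : Int), L) := by
  rw [Prod.Lex.toLex_lt_toLex]
  simp [neg_lt_neg_iff, neg_inj, gt_iff_lt]

-- equal sort keys name the same location
lemma key_snd_eq {a : String × Int} {c : Int} {L : String}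
    (h : toLex ((-a.2 : Int), a.1) = toLex ((-c : Int), L)) : a.1 = L :=
  congrArg (fun z => (ofLex z).2) h

-- the cumulative-rank loop never changes a key it does not see
lemma foldl_cum_get?_not_mem (T : List (String × Int)) (L : String) :
    ∀ (d : PySem.Dict String Int) (r : Int), L ∉ T.map (·.1) →
    ((T.foldl (fun (st : PySem.Dict String Int × Int) p => (st.1.insert p.1 st.2, st.2 + p.2)) (d, r)).1).get? L = d.get? L := by
  induction T with
  | nil => intro d r _; rfl
  | cons x T ih =>
    intro d r h
    simp only [List.map_cons, List.mem_cons, not_or] at h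
    rw [List.foldl_cons]
    dsimp only
    rw [ih _ _ h.2, PySem.Dict.get?_insert_of_ne _ _ h.1]

-- the cumulative-rank loop: the rank of L is r plus the counts of the entries before L
lemma foldl_cum_get?_mem (S : List (String × Int)) (L : String) :
    ∀ (d : PySem.Dict String Int) (r : Int), (S.map (·.1)).Nodup → L ∈ S.map (·.1) →
    ((S.foldl (fun (st : PySem.Dict String Int × Int) p => (st.1.insert p.1 st.2, st.2 + p.2)) (d, r)).1).get? L
      = some (r + ((S.takeWhile (fun p => p.1 ≠ L)).map (·.2)).sum) := by
  induction S with
  | nil => intro d r _ h; simp at h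
  | cons x S ih =>
    intro d r hnd hm
    simp only [List.map_cons, List.nodup_cons] at hnd
    rw [List.foldl_cons]
    dsimp only
    by_cases hx : x.1 = L
    · subst hx
      rw [foldl_cum_get?_not_mem _ _ _ _ hnd.1, PySem.Dict.get?_insert_self]
      simp
    · simp only [List.map_cons, List.mem_cons] at hm
      rcases hm with hm | hm
      · exact absurd hm.symm hx
      · rw [ih _ _ hnd.2 hm]
        have ht : (x :: S).takeWhile (fun p => p.1 ≠ L) = x :: S.takeWhile (fun p => p.1 ≠ L) := by
          simp [hx]
        rw [ht]
        simp only [List.map_cons, List.sum_cons]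
        congr 1
        ring

-- takeWhile of an all-true prefix followed by a false element
lemma takeWhile_prefix (p : (String × Int) → Bool) (P Q : List (String × Int)) (x : String × Int)
    (hP : ∀ a ∈ P, p a = true) (hx : p x = false) :
    (P ++ x :: Q).takeWhile p = P := by
  induction P with
  | nil => simp [hx]
  | cons y P ih =>
    have hy := hP y (by simp)
    simp only [List.cons_append, List.takeWhile_cons, hy, if_true]
    rw [ih (fun a ha => hP a (by simp [ha]))]

-- on the (≤)-sorted, key-nodup list, the prefix before L's entry is exactly the part
-- strictly ahead of (L, c) in the (-count, name) order
lemma takeWhile_eq_filter_of_sorted (S : List (String × Int)) (L : String) (c : Int)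
    (hmem : (L, c) ∈ S)
    (hnd : (S.map (·.1)).Nodup)
    (hpw : S.Pairwise (fun a b => toLex ((-a.2 : Int), a.1) ≤ toLex ((-b.2 : Int), b.1))) :
    S.takeWhile (fun p => p.1 ≠ L)
      = S.filter (fun p => decide (p.2 > c ∨ (p.2 = c ∧ p.1 < L))) := by
  obtain ⟨P, Q, rfl⟩ := List.append_of_mem hmem
  have hndP : ∀ a ∈ P, a.1 ≠ L := by
    intro a ha hEq
    rw [List.map_append] at hnd
    have hd := (List.nodup_append.mp hnd).2.2
    exact hd a.1 (List.mem_map_of_mem ha) L (by simp) hEq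
  have key_lt : ∀ a ∈ P, toLex ((-a.2 : Int), a.1) < toLex ((-c : Int), L) := by
    intro a ha
    have hle : toLex ((-a.2 : Int), a.1) ≤ toLex ((-c : Int), L) := by
      have := (List.pairwise_append.mp hpw).2.2 a ha (L, c) (by simp)
      simpa using this
    rcases lt_or_eq_of_le hle with h | h
    · exact h
    · exact absurd (key_snd_eq h) (hndP a ha)
  have hQ : ∀ q ∈ Q, ¬ toLex ((-q.2 : Int), q.1) < toLex ((-c : Int), L) := by
    intro q hq
    have hpc := (List.pairwise_append.mp hpw).2.1
    have hle : toLex ((-c : Int), L) ≤ toLex ((-q.2 : Int), q.1) := by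
      have := (List.pairwise_cons.mp hpc).1 q hq
      simpa using this
    exact not_lt.mpr hle
  rw [takeWhile_prefix _ P Q (L, c) (fun a ha => by simpa using hndP a ha) (by simp)]
  rw [List.filter_append]
  have h1 : P.filter (fun p => decide (p.2 > c ∨ (p.2 = c ∧ p.1 < L))) = P :=
    List.filter_eq_self.mpr (fun a ha => by
      simp only [decide_eq_true_eq, pred_iff_key_lt]
      exact key_lt a ha)
  have h2 : ((L, c) :: Q).filter (fun p => decide (p.2 > c ∨ (p.2 = c ∧ p.1 < L))) = [] := by
    rw [List.filter_eq_nil_iff]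
    intro a ha
    simp only [decide_eq_true_eq, pred_iff_key_lt]
    rcases List.mem_cons.mp ha with rfl | ha'
    · exact lt_irrefl _
    · exact hQ a ha'
  rw [h1, h2, List.append_nil]

-- sum view of B's rank loop
lemma altRank_eq_sum (items : List (String × Int)) (L : String) (c : Int) :
    altRank items L c = 1 + ((items.filter (fun p => decide (p.2 > c ∨ (p.2 = c ∧ p.1 < L)))).map (·.2)).sum := by
  unfold altRank
  rw [PySem.List.foldl_ite_eq_foldl_filter]
  exact PySem.List.foldl_add _ _ 1

-- the two rank computations agree on every counted location
lemma rank_eq (locs : List String) (L : String) (hL : L ∈ locs) :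
    ((PySem.List.sorted2 (PySem.Dict.counter locs).items (fun x => -x.2) (fun x => x.1)).foldl
      (fun (st : PySem.Dict String Int × Int) p => (st.1.insert p.1 st.2, st.2 + p.2)) (PySem.Dict.empty, 1)).1.getD L 1000
    = (((PySem.Dict.counter locs).items.foldl
        (fun (d : PySem.Dict String Int) p => d.insert p.1 (altRank (PySem.Dict.counter locs).items p.1 p.2))
        PySem.Dict.empty).get? L).getD 0 := by
  set items := (PySem.Dict.counter locs).items with hitems
  have hkeys : items.map (·.1) = PySem.Set.ofList locs := by
    rw [hitems]
    have hk := PySem.Dict.keys_counter (κ := String) locs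
    simpa [PySem.Dict.keys] using hk
  have hndI : (items.map (·.1)).Nodup := by rw [hkeys]; exact PySem.Set.nodup_ofList locs
  have hmemI : (L, (locs.count L : Int)) ∈ items := by
    rw [hitems, PySem.Dict.items_counter]
    exact List.mem_map_of_mem ((PySem.Set.mem_ofList locs L).mpr hL)
  have hLI : L ∈ items.map (·.1) := by rw [hkeys]; exact (PySem.Set.mem_ofList locs L).mpr hL
  rw [sorted2_eq_sorted_lex]
  have hperm : (PySem.List.sorted items (fun x => toLex ((-x.2 : Int), x.1)) false).Perm items :=
    PySem.List.sorted_perm _ _ _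
  have hndS : ((PySem.List.sorted items (fun x => toLex ((-x.2 : Int), x.1)) false).map (·.1)).Nodup :=
    ((hperm.map (·.1)).nodup_iff).mpr hndI
  have hLS : L ∈ (PySem.List.sorted items (fun x => toLex ((-x.2 : Int), x.1)) false).map (·.1) :=
    ((hperm.map (·.1)).mem_iff).mpr hLI
  rw [PySem.Dict.getD_of_get?_eq_some _ 1000 (foldl_cum_get?_mem _ L _ _ hndS hLS)]
  have hmemS : (L, (locs.count L : Int)) ∈ PySem.List.sorted items (fun x => toLex ((-x.2 : Int), x.1)) false :=
    hperm.mem_iff.mpr hmemI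
  have hpw : (PySem.List.sorted items (fun x => toLex ((-x.2 : Int), x.1)) false).Pairwise
      (fun a b => toLex ((-a.2 : Int), a.1) ≤ toLex ((-b.2 : Int), b.1)) :=
    PySem.List.sorted_pairwise items (fun x => toLex ((-x.2 : Int), x.1))
  rw [takeWhile_eq_filter_of_sorted _ L (locs.count L) hmemS hndS hpw]
  have hitemsB : (items.foldl (fun (d : PySem.Dict String Int) p => d.insert p.1 (altRank items p.1 p.2)) PySem.Dict.empty).items
      = items.map (fun p => (p.1, altRank items p.1 p.2)) := by
    have := PySem.Dict.items_foldl_insert_fresh items (·.1) (fun p => altRank items p.1 p.2) PySem.Dict.empty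
      (fun a _ => rfl) hndI
    simpa using this
  have hndB : (items.foldl (fun (d : PySem.Dict String Int) p => d.insert p.1 (altRank items p.1 p.2)) PySem.Dict.empty).keys.Nodup := by
    simp only [PySem.Dict.keys, hitemsB, List.map_map]
    simpa [Function.comp] using hndI
  rw [PySem.Dict.get?_of_mem_items _ (by rw [hitemsB]; exact List.mem_map_of_mem hmemI) hndB]
  rw [Option.getD_some, altRank_eq_sum]
  congr 1
  exact List.Perm.sum_eq (((hperm.filter _)).map (·.2))

-- ===== VERDICT (by name: the statement is the Claim_ definition above) =====
theorem augment_location_ranks_spec : Claim_equal_augment_location_ranks := by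
  intro all_incidents _
  unfold Spec_augment_location_ranks augment_location_ranks augment_location_ranks_alt
  dsimp only
  apply List.map_congr_left
  intro i hi
  simp only [Prod.mk.injEq, true_and]
  exact rank_eq (all_incidents.map (fun incident => incident.2.2.2.2.1)) i.2.2.2.2.1
    (List.mem_map_of_mem hi)
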